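-- pv_equiv track=rewrite | github.com/richard-ma/weekendProject | photograph-caculator/distance.py | approximateNumber
-- ===== SOURCE A (Python) =====
-- def approximateNumber(data, num):
--     """查找list中的n对应位置
--
--     :data: list数据
--     :num: 待查找的数值
--     :returns: 在list中的key值(lower_bound, upper_bound)
--
--     """
--
--     upper_bound = max(data)
--     lower_bound = min(data)
--
--     for value in data:
--         if value < num and lower_bound < value:
--             lower_bound = value
--
--         if value > num and upper_bound > value:
--             upper_bound = value
--
--         if num == value:
--             lower_bound = upper_bound = value
--             break
--
--     return lower_bound, upper_bound
-- ===== SOURCE B (Python) =====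
-- def approximateNumber(data, num):
--     if num in data:
--         return num, num
--     lowers = [v for v in data if v < num]
--     uppers = [v for v in data if v > num]
--     return (max(lowers) if lowers else min(data),
--             min(uppers) if uppers else max(data))
-- ===== Notes on version B (the rewrite author's own statement) =====
-- stated objective: simpler
-- what changed: Replaces the single combined tracking scan (running lower/upper bounds with an in-loop break) by an exact-match membership test plus two filtered passes resolved with max/min, falling back to min(data)/max(data) when a side is empty.
import Mathlib
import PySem

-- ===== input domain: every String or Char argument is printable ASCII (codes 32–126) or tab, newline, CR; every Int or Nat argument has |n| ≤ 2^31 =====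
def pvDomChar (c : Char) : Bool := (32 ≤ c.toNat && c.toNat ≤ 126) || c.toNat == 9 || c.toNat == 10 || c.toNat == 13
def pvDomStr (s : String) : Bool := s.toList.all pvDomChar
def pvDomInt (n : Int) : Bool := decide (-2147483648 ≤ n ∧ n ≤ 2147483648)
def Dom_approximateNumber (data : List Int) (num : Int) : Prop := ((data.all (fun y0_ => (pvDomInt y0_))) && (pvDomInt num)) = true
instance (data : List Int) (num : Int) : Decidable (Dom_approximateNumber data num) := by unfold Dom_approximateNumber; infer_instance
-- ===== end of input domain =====

-- B replaces A's single tracking scan (running bounds + break) with a membership test and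
-- two filtered passes resolved by max/min; objective: simpler. Equivalence is on return values.

-- ===== PORT A =====
-- the for-loop of A: running lower/upper bounds, early break on an exact match
def approxLoop (num : Int) : List Int → Int → Int → Int × Int
  | [], lb, ub => (lb, ub)
  | v :: rest, lb, ub =>
    let lb' := if v < num ∧ lb < v then v else lb
    let ub' := if v > num ∧ ub > v then v else ub
    if num = v then (v, v) else approxLoop num rest lb' ub'

def approximateNumber (data : List Int) (num : Int) : Int × Int :=
  -- max(data) / min(data): none = ValueError on empty data, excluded by Pre_; default unreachable
  match PySem.List.max? data (fun y => y), PySem.List.min? data (fun y => y) with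
  | some ub, some lb => approxLoop num data lb ub
  | _, _ => (0, 0)

-- ===== PORT B =====
def approximateNumber_alt (data : List Int) (num : Int) : Int × Int :=
  if data.contains num then (num, num)
  else
    let lowers := data.filter (fun v => v < num)
    let uppers := data.filter (fun v => v > num)
    -- min(data) / max(data): none = ValueError on empty data, excluded by Pre_; default unreachable
    ((match PySem.List.max? lowers (fun y => y) with
      | some m => m
      | none => (PySem.List.min? data (fun y => y)).getD 0),
     (match PySem.List.min? uppers (fun y => y) with
      | some m => m
      | none => (PySem.List.max? data (fun y => y)).getD 0))

-- ===== PRECONDITION & SPEC =====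
-- Pre_ excludes only the empty list, on which A (max(data)) and B (min/max of data) both raise ValueError.
def Pre_approximateNumber (data : List Int) (num : Int) : Prop := data ≠ []
instance (data : List Int) (num : Int) : Decidable (Pre_approximateNumber data num) := by unfold Pre_approximateNumber; infer_instance

def pvWitness_approximateNumber : List Int × Int := ([1, 3, 7], 4)

def Spec_approximateNumber (data : List Int) (num : Int) (out : Int × Int) : Prop := out = approximateNumber_alt data num
instance (data : List Int) (num : Int) (out : Int × Int) : Decidable (Spec_approximateNumber data num out) := by unfold Spec_approximateNumber; infer_instance

-- ===== CLAIM (what is proved, stated in full; the proofs are below) =====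
def Claim_equal_approximateNumber : Prop := ∀ (data : List Int) (num : Int), Dom_approximateNumber data num → Pre_approximateNumber data num → Spec_approximateNumber data num (approximateNumber data num)

-- ===== LEMMAS AND PROOFS =====

-- early break: if num occurs in the remaining list, the loop returns (num, num)
theorem approxLoop_mem (num : Int) (l : List Int) (h : num ∈ l) :
    ∀ lb ub, approxLoop num l lb ub = (num, num) := by
  induction l with
  | nil => cases h
  | cons v rest ih =>
    intro lb ub
    by_cases hv : num = v
    · simp [approxLoop, hv]
    · cases h with
      | head => exact absurd rfl hv
      | tail _ hm => simp [approxLoop, hv, ih hm]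

-- no match: the loop is a pair of independent folds
theorem approxLoop_not_mem (num : Int) (l : List Int) (h : num ∉ l) :
    ∀ lb ub, approxLoop num l lb ub =
      (l.foldl (fun lb v => if v < num ∧ lb < v then v else lb) lb,
       l.foldl (fun ub v => if v > num ∧ ub > v then v else ub) ub) := by
  induction l with
  | nil => intro lb ub; rfl
  | cons v rest ih =>
    intro lb ub
    have hv : num ≠ v := fun e => h (e ▸ List.mem_cons_self ..)
    have hr : num ∉ rest := fun m => h (List.mem_cons_of_mem _ m)
    simp only [approxLoop, if_neg hv, ih hr, List.foldl_cons]

-- the lower-bound fold is a running max over the filtered list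
theorem foldl_lo (num : Int) (l : List Int) :
    ∀ lb, l.foldl (fun lb v => if v < num ∧ lb < v then v else lb) lb
        = (l.filter (fun v => v < num)).foldl max lb := by
  induction l with
  | nil => intro lb; rfl
  | cons v rest ih =>
    intro lb
    by_cases hv : v < num
    · have : (if v < num ∧ lb < v then v else lb) = max lb v := by
        by_cases hl : lb < v
        · simp [hv, hl, max_eq_right (le_of_lt hl)]
        · simp [hv, hl, max_eq_left (le_of_not_gt hl)]
      rw [List.foldl_cons, ih, this, List.filter_cons_of_pos (by simpa using hv),
        List.foldl_cons]
    · rw [List.foldl_cons, if_neg (fun hc => hv hc.1), ih,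
        List.filter_cons_of_neg (by simpa using hv)]

-- the upper-bound fold is a running min over the filtered list
theorem foldl_hi (num : Int) (l : List Int) :
    ∀ ub, l.foldl (fun ub v => if v > num ∧ ub > v then v else ub) ub
        = (l.filter (fun v => v > num)).foldl min ub := by
  induction l with
  | nil => intro ub; rfl
  | cons v rest ih =>
    intro ub
    by_cases hv : v > num
    · have : (if v > num ∧ ub > v then v else ub) = min ub v := by
        by_cases hl : ub > v
        · simp [hv, hl, min_eq_right (le_of_lt hl)]
        · simp [hv, hl, min_eq_left (le_of_not_gt hl)]
      rw [List.foldl_cons, ih, this, List.filter_cons_of_pos (by simpa using hv),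
        List.foldl_cons]
    · rw [List.foldl_cons, if_neg (fun hc => hv hc.1), ih,
        List.filter_cons_of_neg (by simpa using hv)]

theorem foldl_max_absorb (a w : Int) (ws : List Int) (h : a ≤ w) :
    (w :: ws).foldl max a = ws.foldl max w := by
  simp [List.foldl_cons, max_eq_right h]

theorem foldl_min_absorb (a w : Int) (ws : List Int) (h : w ≤ a) :
    (w :: ws).foldl min a = ws.foldl min w := by
  simp [List.foldl_cons, min_eq_right h]

-- ===== VERDICT (by name: the statement is the Claim_ definition above) =====
theorem approximateNumber_spec : Claim_equal_approximateNumber := by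
  intro data num _dom hpre
  unfold Spec_approximateNumber
  match data with
  | [] => exact absurd rfl hpre
  | x :: t =>
    have hA : approximateNumber (x :: t) num
        = approxLoop num (x :: t) (t.foldl min x) (t.foldl max x) := by
      simp [approximateNumber, PySem.List.max?_id_cons, PySem.List.min?_id_cons]
    by_cases hmem : num ∈ x :: t
    · have hc : (x :: t).contains num = true := by
        simpa [List.contains_iff_mem] using hmem
      rw [hA, approxLoop_mem num _ hmem]
      simp only [approximateNumber_alt, hc, if_true]
    · have hc : (x :: t).contains num = false := by
        simp [hmem]
      have hlb_le : ∀ y ∈ x :: t, t.foldl min x ≤ y := by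
        intro y hy
        rcases List.mem_cons.mp hy with rfl | hy
        · exact (PySem.List.foldl_min_le t y).1
        · exact (PySem.List.foldl_min_le t x).2 y hy
      have hub_ge : ∀ y ∈ x :: t, y ≤ t.foldl max x := by
        intro y hy
        rcases List.mem_cons.mp hy with rfl | hy
        · exact (PySem.List.le_foldl_max t y).1
        · exact (PySem.List.le_foldl_max t x).2 y hy
      rw [hA, approxLoop_not_mem num _ hmem, foldl_lo, foldl_hi]
      simp only [approximateNumber_alt, hc, Bool.false_eq_true, if_false]
      refine Prod.ext ?_ ?_
      · -- lower component
        cases hflt : (x :: t).filter (fun v => v < num) with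
        | nil =>
          simp [PySem.List.max?, PySem.List.min?_id_cons]
        | cons w ws =>
          have hw : w ∈ x :: t := List.mem_of_mem_filter (by rw [hflt]; exact List.mem_cons_self ..)
          simp [PySem.List.max?_id_cons, foldl_max_absorb _ _ _ (hlb_le w hw)]
      · -- upper component
        cases hflt : (x :: t).filter (fun v => v > num) with
        | nil =>
          simp [PySem.List.min?, PySem.List.max?_id_cons]
        | cons w ws =>
          have hw : w ∈ x :: t := List.mem_of_mem_filter (by rw [hflt]; exact List.mem_cons_self ..)
          simp [PySem.List.min?_id_cons, foldl_min_absorb _ _ _ (hub_ge w hw)]
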